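-- pv_equiv track=rewrite | github.com/karankumbhar47/Crypto_Assignments | Midori(Term_Paper)/MILP_Model/MixColumn_inequationGen.py | bit_level_binary_matrix_multiplication
-- ===== SOURCE A (Python) =====
-- def bit_level_binary_matrix_multiplication(A_bits, B):
--     n = len(A_bits)
--     bit_length = len(A_bits[0])
--     output = []
--
--     for i in range(len(B)):
--         W_bits = {j: [] for j in range(bit_length)}
--         for j in range(len(B[i])):
--             if B[i][j] == 1:
--                 for b in range(bit_length):
--                     W_bits[b].append(f"Z{j}{b}")
--
--         output.append(
--             {b: " + ".join(W_bits[b]) if W_bits[b] else "0" for b in range(bit_length)}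
--         )
--
--     return output
-- ===== SOURCE B (Python) =====
-- def bit_level_binary_matrix_multiplication(A_bits, B):
--     bit_length = len(A_bits[0])
--     output = []
--     for row in B:
--         d = {}
--         for b in range(bit_length):
--             expr = None
--             for j, v in enumerate(row):
--                 if v == 1:
--                     if expr is None:
--                         expr = "Z%d%d" % (j, b)
--                     else:
--                         expr += " + " + "Z%d%d" % (j, b)
--             d[b] = "0" if expr is None else expr
--         output.append(d)
--     return output
-- ===== Notes on version B (the rewrite author's own statement) =====
-- stated objective: alternative
-- what changed: B swaps the loop nesting (bits outside, columns inside) and builds each bit's expression by direct string accumulation with an Option accumulator and explicit separator handling, eliminating A's per-bit list buckets and the final join step entirely.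
import Mathlib
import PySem

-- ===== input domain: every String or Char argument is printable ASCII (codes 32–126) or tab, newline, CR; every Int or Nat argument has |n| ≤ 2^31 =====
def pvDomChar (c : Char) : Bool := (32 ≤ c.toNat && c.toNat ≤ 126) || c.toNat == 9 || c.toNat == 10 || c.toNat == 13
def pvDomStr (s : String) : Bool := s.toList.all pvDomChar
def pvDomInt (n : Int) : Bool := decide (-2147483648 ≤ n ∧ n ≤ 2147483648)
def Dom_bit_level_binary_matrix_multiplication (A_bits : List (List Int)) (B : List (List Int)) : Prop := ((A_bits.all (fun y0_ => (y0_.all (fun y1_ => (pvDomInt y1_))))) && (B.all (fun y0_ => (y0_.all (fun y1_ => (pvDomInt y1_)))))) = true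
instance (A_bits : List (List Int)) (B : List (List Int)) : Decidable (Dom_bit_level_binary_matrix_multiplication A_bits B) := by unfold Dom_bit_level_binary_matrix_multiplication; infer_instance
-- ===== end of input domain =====

-- B swaps the loop nesting (bits outside, columns inside) and builds each bit's expression by
-- direct string accumulation with an explicit separator (no buckets, no join) — objective: alternative.


-- ===== PORT A =====
-- loop body for one row of B (A's per-bit bucket dictionary, filled incrementally)
def pvRowA (bit_length : Int) (Bi : List Int) : List (Int × String) :=
  let W0 : PySem.Dict Int (List String) :=
    (PySem.List.pyRange 0 bit_length).foldl (fun d j => d.insert j []) PySem.Dict.empty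
  let W : PySem.Dict Int (List String) :=
    (PySem.List.pyRange 0 (PySem.List.len Bi)).foldl (fun d j =>
      if PySem.List.pyGetD Bi j 0 == 1 then
        (PySem.List.pyRange 0 bit_length).foldl
          (fun d b => d.modify b [] (fun l => l ++ ["Z" ++ PySem.Int.toStr j ++ PySem.Int.toStr b])) d
      else d) W0
  (PySem.List.pyRange 0 bit_length).map (fun b =>
    (b, if (W.getD b []).isEmpty then "0" else PySem.Str.join " + " (W.getD b [])))

def bit_level_binary_matrix_multiplication (A_bits : List (List Int)) (B : List (List Int)) : List (List (Int × String)) :=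
  match PySem.List.pyGet? A_bits 0 with
  | none => []   -- A_bits[0] raises IndexError; excluded by Pre_
  | some row0 =>
    let bit_length := PySem.List.len row0
    (PySem.List.pyRange 0 (PySem.List.len B)).foldl
      (fun output i => output ++ [pvRowA bit_length (PySem.List.pyGetD B i [])]) []

-- ===== PORT B =====
-- loop body for one row of B: per bit, a single pass over the row accumulating
-- Option String (None = no term yet; otherwise "expr + term"); the dict d, whose keys
-- b are fresh and assigned in increasing order, is the accumulated item list.
def pvStepB (b : Int) (e : Option String) (p : Int × Int) : Option String :=
  if p.2 == 1 then
    some (match e with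
          | none => "Z" ++ PySem.Int.toStr p.1 ++ PySem.Int.toStr b
          | some s => s ++ " + " ++ ("Z" ++ PySem.Int.toStr p.1 ++ PySem.Int.toStr b))
  else e

def pvRowB (bit_length : Int) (row : List Int) : List (Int × String) :=
  (PySem.List.pyRange 0 bit_length).foldl (fun d b =>
    let e : Option String := (PySem.List.enumerate row).foldl (pvStepB b) none
    d ++ [(b, match e with | none => "0" | some s => s)]) []

def bit_level_binary_matrix_multiplication_alt (A_bits : List (List Int)) (B : List (List Int)) : List (List (Int × String)) :=
  match PySem.List.pyGet? A_bits 0 with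
  | none => []   -- same IndexError; excluded by Pre_
  | some row0 =>
    let bit_length := PySem.List.len row0
    B.foldl (fun output row => output ++ [pvRowB bit_length row]) []

-- ===== PRECONDITION & SPEC =====
-- A evaluates A_bits[0]; it raises IndexError exactly when A_bits is empty.
def Pre_bit_level_binary_matrix_multiplication (A_bits : List (List Int)) (B : List (List Int)) : Prop := A_bits ≠ []
instance (A_bits : List (List Int)) (B : List (List Int)) : Decidable (Pre_bit_level_binary_matrix_multiplication A_bits B) := by unfold Pre_bit_level_binary_matrix_multiplication; infer_instance
def pvWitness_bit_level_binary_matrix_multiplication : List (List Int) × List (List Int) := ([[1, 0]], [[1, 1, 0], [0, 1]])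

def Spec_bit_level_binary_matrix_multiplication (A_bits : List (List Int)) (B : List (List Int)) (out : List (List (Int × String))) : Prop := out = bit_level_binary_matrix_multiplication_alt A_bits B
instance (A_bits : List (List Int)) (B : List (List Int)) (out : List (List (Int × String))) : Decidable (Spec_bit_level_binary_matrix_multiplication A_bits B out) := by unfold Spec_bit_level_binary_matrix_multiplication; infer_instance

-- ===== CLAIM (what is proved, stated in full; the proofs are below) =====
def Claim_equal_bit_level_binary_matrix_multiplication : Prop := ∀ (A_bits : List (List Int)) (B : List (List Int)), Dom_bit_level_binary_matrix_multiplication A_bits B → Pre_bit_level_binary_matrix_multiplication A_bits B → Spec_bit_level_binary_matrix_multiplication A_bits B (bit_level_binary_matrix_multiplication A_bits B)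

-- ===== LEMMAS AND PROOFS =====

-- enumerate characterised over List.range
lemma pv_enum_eq (row : List Int) : ∀ (s : Int),
    PySem.List.enumerate row s
      = (List.range row.length).map (fun (k : Nat) => ((s + (k : Int)), row.getD k 0)) := by
  induction row with
  | nil => intro s; simp [PySem.List.enumerate]
  | cons x xs ih =>
    intro s
    rw [show (x :: xs).length = xs.length + 1 from rfl, List.range_succ_eq_map]
    rw [show PySem.List.enumerate (x :: xs) s = (s, x) :: PySem.List.enumerate xs (s + 1) by
          simp [PySem.List.enumerate]]
    rw [ih (s + 1)]
    simp only [List.map_cons, List.map_map]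
    refine congrArg₂ List.cons (by simp) ?_
    apply List.map_congr_left
    intro k _
    simp only [Function.comp]
    refine Prod.ext ?_ rfl
    push_cast
    ring

-- A's index loop over range(len(row)) with row[j] is the fold over enumerate(row)
lemma pv_foldl_pyRange_enumerate {β : Type} (g : β → Int → Int → β) (row : List Int) (d : β) :
    (PySem.List.pyRange 0 (PySem.List.len row)).foldl (fun d j => g d j (PySem.List.pyGetD row j 0)) d
      = (PySem.List.enumerate row).foldl (fun d p => g d p.1 p.2) d := by
  have hlen : PySem.List.len row = (row.length : Int) := by simp [PySem.List.len]
  rw [hlen, PySem.List.pyRange_zero_natCast, List.foldl_map, pv_enum_eq row 0, List.foldl_map]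
  apply PySem.List.foldl_congr_mem
  intro acc k _
  simp only [zero_add]
  rw [PySem.List.pyGetD_natCast]

-- the initial dict {j: [] for j in range(bit_length)} maps everything to []
lemma pv_init_getD : ∀ (K : List Int) (d : PySem.Dict Int (List String)),
    (∀ b, d.getD b ([] : List String) = []) →
    ∀ b, ((K.foldl (fun d j => d.insert j []) d).getD b ([] : List String)) = [] := by
  intro K
  induction K with
  | nil => intro d h b; exact h b
  | cons k K ih =>
    intro d h b
    simp only [List.foldl_cons]
    refine ih _ ?_ b
    intro b'
    by_cases hb : b' = k
    · subst hb; simp [PySem.Dict.getD_insert_self]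
    · rw [PySem.Dict.getD_insert_of_ne _ _ _ hb]; exact h b'

-- one active column j appends its literal to every bucket of a duplicate-free key list
lemma pv_inner_getD (j : Int) : ∀ (K : List Int), K.Nodup →
    ∀ (d : PySem.Dict Int (List String)) (b : Int),
    ((K.foldl (fun d b => d.modify b [] (fun l => l ++ ["Z" ++ PySem.Int.toStr j ++ PySem.Int.toStr b])) d).getD b [])
      = d.getD b [] ++ (if b ∈ K then ["Z" ++ PySem.Int.toStr j ++ PySem.Int.toStr b] else []) := by
  intro K
  induction K with
  | nil => intro _ d b; simp
  | cons k K ih =>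
    intro hnd d b
    simp only [List.foldl_cons]
    rw [ih hnd.of_cons]
    by_cases hb : b = k
    · subst hb
      have hnotin : b ∉ K := (List.nodup_cons.mp hnd).1
      simp [hnotin, PySem.Dict.getD_modify_self]
    · rw [PySem.Dict.getD_modify_of_ne _ _ _ hb]
      simp [List.mem_cons, hb]

-- the whole j-loop: each bucket b collects the literals of the active columns, in order
lemma pv_outer_getD (K : List Int) (hnd : K.Nodup) : ∀ (ps : List (Int × Int)) (d : PySem.Dict Int (List String)) (b : Int), b ∈ K →
    ((ps.foldl (fun d p => if p.2 == 1 then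
        K.foldl (fun d b => d.modify b [] (fun l => l ++ ["Z" ++ PySem.Int.toStr p.1 ++ PySem.Int.toStr b])) d
      else d) d).getD b [])
      = d.getD b [] ++ ((ps.filter (fun p => p.2 == 1)).map (fun p => "Z" ++ PySem.Int.toStr p.1 ++ PySem.Int.toStr b)) := by
  intro ps
  induction ps with
  | nil => intro d b _; simp
  | cons p ps ih =>
    intro d b hb
    simp only [List.foldl_cons, List.filter_cons]
    by_cases hp : (p.2 == 1) = true
    · simp only [hp, if_true]
      rw [ih _ _ hb, pv_inner_getD p.1 K hnd _ b, if_pos hb]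
      simp
    · simp only [Bool.not_eq_true] at hp
      simp only [hp, Bool.false_eq_true, if_false]
      exact ih _ _ hb

lemma pv_pyRange_nodup (n : Int) : (PySem.List.pyRange 0 n).Nodup := by
  rw [PySem.List.pyRange_of_pos 0 n one_pos]
  exact List.nodup_range.map (fun a b h => by simpa using h)

-- A's j-loop rewritten as a fold over enumerate(row) (instance of pv_foldl_pyRange_enumerate)
lemma pv_Wfold_eq (bl : Int) (row : List Int) (d0 : PySem.Dict Int (List String)) :
    (PySem.List.pyRange 0 (PySem.List.len row)).foldl (fun d j =>
        if PySem.List.pyGetD row j 0 == 1 then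
          (PySem.List.pyRange 0 bl).foldl
            (fun d b => d.modify b [] (fun l => l ++ ["Z" ++ PySem.Int.toStr j ++ PySem.Int.toStr b])) d
        else d) d0
      = (PySem.List.enumerate row).foldl (fun d p =>
        if p.2 == 1 then
          (PySem.List.pyRange 0 bl).foldl
            (fun d b => d.modify b [] (fun l => l ++ ["Z" ++ PySem.Int.toStr p.1 ++ PySem.Int.toStr b])) d
        else d) d0 :=
  pv_foldl_pyRange_enumerate (fun d j v =>
    if v == 1 then
      (PySem.List.pyRange 0 bl).foldl
        (fun d b => d.modify b [] (fun l => l ++ ["Z" ++ PySem.Int.toStr j ++ PySem.Int.toStr b])) d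
    else d) row d0

-- append-accumulate fold = map
lemma pv_foldl_append_map {α β : Type} (f : α → β) : ∀ (K : List α) (acc : List β),
    K.foldl (fun d b => d ++ [f b]) acc = acc ++ K.map f := by
  intro K
  induction K with
  | nil => intro acc; simp
  | cons k K ih => intro acc; simp [ih]

-- the plain accumulation step on strings
def pvStep (e : Option String) (t : String) : Option String :=
  some (match e with | none => t | some s => s ++ " + " ++ t)

lemma pv_fold_some : ∀ (L : List String) (t : String),
    L.foldl pvStep (some t) = some (L.foldl (fun s u => s ++ " + " ++ u) t) := by
  intro L
  induction L with
  | nil => intro t; rfl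
  | cons u L ih => intro t; simp only [List.foldl_cons]; exact ih _

-- prepending "t ++ sep ++ ·" to the head of a join pulls out of the join
lemma pv_join_shift (sep t u : List Char) : ∀ (M : List (List Char)),
    PySem.Chars.join sep ((t ++ sep ++ u) :: M) = t ++ sep ++ PySem.Chars.join sep (u :: M) := by
  intro M
  cases M with
  | nil => rw [PySem.Chars.join_singleton, PySem.Chars.join_singleton]
  | cons v M =>
    rw [PySem.Chars.join_cons_cons, PySem.Chars.join_cons_cons]
    simp [List.append_assoc]

-- left fold with " + " is Python's " + ".join on a nonempty list
lemma pv_fold_join : ∀ (L : List String) (t : String),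
    L.foldl (fun s u => s ++ " + " ++ u) t = PySem.Str.join " + " (t :: L) := by
  intro L
  induction L with
  | nil =>
    intro t
    apply String.toList_inj.mp
    rw [PySem.Str.toList_join]
    simp only [List.map_cons, List.map_nil, List.foldl_nil]
    rw [PySem.Chars.join_singleton]
  | cons u L ih =>
    intro t
    simp only [List.foldl_cons]
    rw [ih]
    apply String.toList_inj.mp
    rw [PySem.Str.toList_join, PySem.Str.toList_join]
    simp only [List.map_cons, String.toList_append]
    rw [pv_join_shift, PySem.Chars.join_cons_cons]

-- the two per-row computations agree
lemma pv_row_eq (bl : Int) (row : List Int) : pvRowA bl row = pvRowB bl row := by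
  unfold pvRowA pvRowB
  simp only []
  rw [pv_foldl_append_map, List.nil_append]
  apply List.map_congr_left
  intro b hb
  refine Prod.ext rfl ?_
  -- rewrite B's inner fold as a fold of pvStep over the filtered-mapped term list
  have hB : (PySem.List.enumerate row).foldl (pvStepB b) none
      = (((PySem.List.enumerate row).filter (fun p => p.2 == 1)).map
          (fun p => "Z" ++ PySem.Int.toStr p.1 ++ PySem.Int.toStr b)).foldl pvStep none := by
    rw [List.foldl_map, List.foldl_filter]
    apply PySem.List.foldl_congr_mem
    intro e p _
    simp [pvStepB, pvStep]
  -- rewrite A's bucket to the same term list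
  rw [pv_Wfold_eq bl row]
  rw [pv_outer_getD (PySem.List.pyRange 0 bl) (pv_pyRange_nodup bl) (PySem.List.enumerate row) _ b hb]
  rw [pv_init_getD (PySem.List.pyRange 0 bl) PySem.Dict.empty (fun b => by simp) b]
  simp only [List.nil_append, hB]
  cases hL : ((PySem.List.enumerate row).filter (fun p => p.2 == 1)).map
      (fun p => "Z" ++ PySem.Int.toStr p.1 ++ PySem.Int.toStr b) with
  | nil => rfl
  | cons t L =>
    simp only [List.foldl_cons, List.isEmpty_cons]
    rw [show pvStep none t = some t from rfl, pv_fold_some, pv_fold_join]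
    simp

-- ===== VERDICT (by name: the statement is the Claim_ definition above) =====
theorem bit_level_binary_matrix_multiplication_spec : Claim_equal_bit_level_binary_matrix_multiplication := by
  intro A_bits B _ hpre
  unfold Spec_bit_level_binary_matrix_multiplication
  unfold bit_level_binary_matrix_multiplication bit_level_binary_matrix_multiplication_alt
  cases h : PySem.List.pyGet? A_bits 0 with
  | none => rfl
  | some row0 =>
    simp only []
    rw [PySem.List.foldl_pyRange_pyGetD B ([] : List Int)
        (fun output bi => output ++ [pvRowA (PySem.List.len row0) bi]) [] (le_refl 0)]
    simp only [Int.toNat_zero, List.drop_zero]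
    apply PySem.List.foldl_congr_mem
    intro acc row _
    rw [pv_row_eq]
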